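-- pv_equiv track=rewrite | github.com/aethiiis/AdventOfCode2024 | src/day09/day09.py | find_position_blocks
-- ===== SOURCE A (Python) =====
-- def find_position_blocks(blocks, gaps):
--     positions = [(0, blocks[0])]
--     blocks = blocks[1:]
--
--     while len(blocks) != 0:
--         positions.append((positions[-1][1] + gaps[0], positions[-1][1] + gaps[0] + blocks[0]))
--         blocks = blocks[1:]
--         gaps = gaps[1:]
--
--     return positions
-- ===== SOURCE B (Python) =====
-- def find_position_blocks(blocks, gaps):
--     # First pass: table of cumulative start offsets; second pass: pair with ends.
--     starts = [0] * len(blocks)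
--     for i in range(1, len(blocks)):
--         starts[i] = starts[i - 1] + blocks[i - 1] + gaps[i - 1]
--     return [(s, s + b) for s, b in zip(starts, blocks)]
-- ===== Notes on version B (the rewrite author's own statement) =====
-- stated objective: faster
-- what changed: Replaces A's single interleaved scan that repeatedly slices blocks/gaps and reads positions[-1] with a two-pass design: a cumulative start-offset table, then a zip producing (start, start+block) pairs.
import Mathlib
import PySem

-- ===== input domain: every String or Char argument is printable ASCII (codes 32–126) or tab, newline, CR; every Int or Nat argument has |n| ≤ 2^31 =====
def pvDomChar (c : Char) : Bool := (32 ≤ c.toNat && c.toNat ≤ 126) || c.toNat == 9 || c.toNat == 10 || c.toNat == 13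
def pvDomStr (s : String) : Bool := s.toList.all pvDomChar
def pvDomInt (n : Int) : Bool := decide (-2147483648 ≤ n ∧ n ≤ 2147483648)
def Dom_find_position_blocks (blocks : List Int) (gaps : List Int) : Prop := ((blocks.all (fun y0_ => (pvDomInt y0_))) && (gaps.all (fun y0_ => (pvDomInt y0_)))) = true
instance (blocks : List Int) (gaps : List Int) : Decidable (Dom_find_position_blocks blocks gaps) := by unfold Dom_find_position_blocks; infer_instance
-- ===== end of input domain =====

-- B replaces A's interleaved slicing scan with a start-offset table pass plus a zip pass (alternative decomposition, same results on Pre_).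


-- ===== PORT A =====
-- while-loop of A: state = (remaining blocks, remaining gaps, positions accumulator);
-- positions[-1][1] read via getLast?.getD (the accumulator is never empty), gaps[0] via headD
-- (the default is only reached outside Pre_, where the Python raises IndexError).
def fpbA_loop (blocks : List Int) (gaps : List Int) (positions : List (Int × Int)) : List (Int × Int) :=
  match blocks with
  | [] => positions
  | b :: rest =>
    let e := (positions.getLast?.getD (0, 0)).2
    let g := gaps.headD 0
    fpbA_loop rest gaps.tail (positions ++ [(e + g, e + g + b)])

def find_position_blocks (blocks : List Int) (gaps : List Int) : List (Int × Int) :=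
  match blocks with
  | [] => []  -- Python A raises IndexError here (blocks[0]); excluded by Pre_
  | b0 :: rest => fpbA_loop rest gaps [(0, b0)]

-- ===== PORT B =====
-- first pass of B: the cumulative start-offset table (starts[i] = starts[i-1] + blocks[i-1] + gaps[i-1])
def fpbB_starts (prev : Int) (bs : List Int) (gs : List Int) : List Int :=
  match bs with
  | [] => []
  | b :: rest => prev :: fpbB_starts (prev + b + gs.headD 0) rest gs.tail

def find_position_blocks_alt (blocks : List Int) (gaps : List Int) : List (Int × Int) :=
  let starts := fpbB_starts 0 blocks gaps
  List.zipWith (fun s b => (s, s + b)) starts blocks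

-- ===== PRECONDITION & SPEC =====
-- Pre_ excludes exactly the inputs where Python A raises IndexError: empty blocks
-- (blocks[0]) or fewer than len(blocks)-1 gaps (gaps[0] in some iteration).
def Pre_find_position_blocks (blocks : List Int) (gaps : List Int) : Prop :=
  blocks ≠ [] ∧ blocks.length - 1 ≤ gaps.length
instance (blocks : List Int) (gaps : List Int) : Decidable (Pre_find_position_blocks blocks gaps) := by unfold Pre_find_position_blocks; infer_instance
def pvWitness_find_position_blocks : List Int × List Int := ([2, 3, 1], [4, 5])

def Spec_find_position_blocks (blocks : List Int) (gaps : List Int) (out : List (Int × Int)) : Prop := out = find_position_blocks_alt blocks gaps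
instance (blocks : List Int) (gaps : List Int) (out : List (Int × Int)) : Decidable (Spec_find_position_blocks blocks gaps out) := by unfold Spec_find_position_blocks; infer_instance

-- ===== CLAIM (what is proved, stated in full; the proofs are below) =====
def Claim_equal_find_position_blocks : Prop := ∀ (blocks : List Int) (gaps : List Int), Dom_find_position_blocks blocks gaps → Pre_find_position_blocks blocks gaps → Spec_find_position_blocks blocks gaps (find_position_blocks blocks gaps)

-- ===== LEMMAS AND PROOFS =====

-- common normal form: the chunk of positions produced after an element ending at e
def fpbChunk (e : Int) (bs : List Int) (gs : List Int) : List (Int × Int) :=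
  match bs with
  | [] => []
  | b :: rest =>
    let g := gs.headD 0
    (e + g, e + g + b) :: fpbChunk (e + g + b) rest gs.tail

theorem fpbA_loop_eq (bs : List Int) : ∀ (gs : List Int) (pre : List (Int × Int)) (x e : Int),
    fpbA_loop bs gs (pre ++ [(x, e)]) = pre ++ (x, e) :: fpbChunk e bs gs := by
  induction bs with
  | nil => intro gs pre x e; simp [fpbA_loop, fpbChunk]
  | cons b rest ih =>
    intro gs pre x e
    have h : ((pre ++ [(x, e)]).getLast?.getD (0, 0)).2 = e := by
      simp
    have := ih gs.tail (pre ++ [(x, e)]) (e + gs.headD 0) (e + gs.headD 0 + b)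
    simp only [fpbA_loop, h, List.append_assoc, List.cons_append, List.nil_append] at this ⊢
    rw [this]
    simp [fpbChunk]

def fpbChunkStart : Int → List Int → List Int → List (Int × Int)
  | _, [], _ => []
  | p, b :: rest, gs => (p, p + b) :: fpbChunkStart (p + b + gs.headD 0) rest gs.tail

theorem fpbB_zip_eq (bs : List Int) : ∀ (gs : List Int) (p : Int),
    List.zipWith (fun s b => (s, s + b)) (fpbB_starts p bs gs) bs = fpbChunkStart p bs gs := by
  induction bs with
  | nil => intro gs p; simp [fpbB_starts, fpbChunkStart]
  | cons b rest ih =>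
    intro gs p
    simp [fpbB_starts, fpbChunkStart, ih]

-- phase shift between the start-indexed chunk and the end-indexed chunk
theorem fpbChunk_phase (rest : List Int) : ∀ (gs : List Int) (e b : Int),
    fpbChunkStart e (b :: rest) gs = (e, e + b) :: fpbChunk (e + b) rest gs := by
  induction rest with
  | nil => intro gs e b; simp [fpbChunkStart, fpbChunk]
  | cons b1 rest' ih =>
    intro gs e b
    have := ih gs.tail (e + b + gs.headD 0) b1
    simp only [fpbChunkStart, fpbChunk] at this ⊢
    rw [this]

-- ===== VERDICT (by name: the statement is the Claim_ definition above) =====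
theorem find_position_blocks_spec : Claim_equal_find_position_blocks := by
  intro blocks gaps _ hpre
  unfold Spec_find_position_blocks
  obtain ⟨hne, -⟩ := hpre
  match blocks with
  | [] => exact absurd rfl hne
  | b0 :: rest =>
    show find_position_blocks (b0 :: rest) gaps = find_position_blocks_alt (b0 :: rest) gaps
    have hA : find_position_blocks (b0 :: rest) gaps = (0, b0) :: fpbChunk b0 rest gaps := by
      have := fpbA_loop_eq rest gaps [] 0 b0
      simpa [find_position_blocks] using this
    have hB : find_position_blocks_alt (b0 :: rest) gaps = (0, b0) :: fpbChunk b0 rest gaps := by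
      have h1 := fpbB_zip_eq (b0 :: rest) gaps 0
      have h2 := fpbChunk_phase rest gaps 0 b0
      simp only [find_position_blocks_alt, h1, h2, zero_add]
    rw [hA, hB]
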